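-- pv_equiv track=rewrite | github.com/satuelisa/DiscreteMath | examples/subsets.py | cuales
-- ===== SOURCE A (Python) =====
-- def cuales(ordenado, entero):
--     seleccion = []
--     while entero > 0:
--         if entero & 1: # se incluye
--             seleccion.append(ordenado.pop())
--         else:
--             ordenado.pop() # no se incluye
--         entero >>= 1
--     return sorted(seleccion)
-- ===== SOURCE B (Python) =====
-- def cuales(ordenado, entero):
--     if entero <= 0:
--         return []
--     n = entero.bit_length()
--     removed = ordenado[-n:][::-1]
--     del ordenado[-n:]
--     return sorted(removed[i] for i in range(n) if (entero >> i) & 1)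
-- ===== Notes on version B (the rewrite author's own statement) =====
-- stated objective: alternative
-- what changed: Replaces A's fused while-loop (shift entero, pop, conditionally append) with a table-then-filter shape: compute n = bit_length, slice off the last n elements in one step, then select by bit index with a comprehension and sort.
import Mathlib
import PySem

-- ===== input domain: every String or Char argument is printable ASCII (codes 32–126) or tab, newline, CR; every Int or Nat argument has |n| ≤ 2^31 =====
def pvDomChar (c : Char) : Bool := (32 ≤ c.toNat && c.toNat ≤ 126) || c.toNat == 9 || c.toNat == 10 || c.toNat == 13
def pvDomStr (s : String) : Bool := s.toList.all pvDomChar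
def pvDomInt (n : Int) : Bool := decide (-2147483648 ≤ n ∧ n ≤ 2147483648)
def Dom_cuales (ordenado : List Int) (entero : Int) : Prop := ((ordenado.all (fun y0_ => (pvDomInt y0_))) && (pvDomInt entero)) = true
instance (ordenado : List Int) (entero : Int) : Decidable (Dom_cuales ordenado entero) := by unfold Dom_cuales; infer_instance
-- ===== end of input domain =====

-- B replaces A's fused pop-and-shift loop by bit_length + one slice + a bit-indexed comprehension
-- (objective: alternative decomposition, same cost); equivalence is about the RETURN value — inside
-- Pre_ both Pythons also truncate `ordenado` in place identically.


-- ===== PORT A =====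
-- the while-loop; `ordenado.pop()` removes the last element (pop from [] = IndexError, excluded by
-- Pre_; there the port reads a default 0, unreachable inside Pre_); on a positive int `entero & 1`
-- is `% 2` and `entero >>= 1` is floordiv by 2.
def cualesGo (ordenado : List Int) (entero : Int) (seleccion : List Int) : List Int :=
  if 0 < entero then
    if PySem.Int.mod entero 2 = 1 then
      cualesGo ordenado.dropLast (PySem.Int.floordiv entero 2)
        (seleccion ++ [ordenado.getLast?.getD 0])
    else
      cualesGo ordenado.dropLast (PySem.Int.floordiv entero 2) seleccion
  else PySem.List.sorted seleccion (fun x => x) false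
termination_by entero.toNat
decreasing_by
  all_goals simp only [PySem.Int.floordiv]; rw [Int.fdiv_eq_ediv_of_nonneg _ (by omega)]; omega

def cuales (ordenado : List Int) (entero : Int) : List Int :=
  cualesGo ordenado entero []

-- ===== PORT B =====
-- entero.bit_length() for entero ≥ 0
def pyBitLengthAux : Nat → Nat → Nat
  | 0, _ => 0
  | fuel + 1, n => if n = 0 then 0 else pyBitLengthAux fuel (n / 2) + 1

def pyBitLength (n : Nat) : Nat := pyBitLengthAux n n

-- `(entero >> i) & 1` on a nonnegative int is exactly floordiv by 2^i then mod 2;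
-- `ordenado[-n:][::-1]` is slice then reverse; `removed[i]` is in range inside Pre_.
def cuales_alt (ordenado : List Int) (entero : Int) : List Int :=
  if entero ≤ 0 then []
  else
    let n := pyBitLength entero.toNat
    let removed := (PySem.List.slice ordenado (some (-(n : Int))) none).reverse
    PySem.List.sorted
      (((List.range n).filter
          (fun i => PySem.Int.mod (PySem.Int.floordiv entero (2 ^ i)) 2 = 1)).map
        (fun i => removed.getD i 0))
      (fun x => x) false

-- ===== PRECONDITION & SPEC =====
-- Pre_ excludes exactly the inputs where A raises IndexError (more bits in entero than elements in
-- ordenado: pop from an empty list); B raises IndexError there too.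
def Pre_cuales (ordenado : List Int) (entero : Int) : Prop :=
  0 < entero → pyBitLength entero.toNat ≤ ordenado.length
instance (ordenado : List Int) (entero : Int) : Decidable (Pre_cuales ordenado entero) := by
  unfold Pre_cuales; infer_instance

def pvWitness_cuales : List Int × Int := ([4, 7, 1, 9], 5)

def Spec_cuales (ordenado : List Int) (entero : Int) (out : List Int) : Prop := out = cuales_alt ordenado entero
instance (ordenado : List Int) (entero : Int) (out : List Int) : Decidable (Spec_cuales ordenado entero out) := by unfold Spec_cuales; infer_instance

-- ===== CLAIM (what is proved, stated in full; the proofs are below) =====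
def Claim_equal_cuales : Prop := ∀ (ordenado : List Int) (entero : Int), Dom_cuales ordenado entero → Pre_cuales ordenado entero → Spec_cuales ordenado entero (cuales ordenado entero)

-- ===== LEMMAS AND PROOFS =====

-- the unsorted selection A accumulates, as a standalone recursion
def picks (ordenado : List Int) (entero : Int) : List Int :=
  if 0 < entero then
    (if PySem.Int.mod entero 2 = 1 then [ordenado.getLast?.getD 0] else []) ++
      picks ordenado.dropLast (PySem.Int.floordiv entero 2)
  else []
termination_by entero.toNat
decreasing_by simp only [PySem.Int.floordiv]; rw [Int.fdiv_eq_ediv_of_nonneg _ (by omega)]; omega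

theorem floordiv_two_toNat (e : Int) : (PySem.Int.floordiv e 2).toNat = e.toNat / 2 := by
  simp only [PySem.Int.floordiv]
  rw [Int.fdiv_eq_ediv_of_nonneg _ (by norm_num)]
  omega

theorem cualesGo_eq_sorted_picks (ordenado : List Int) (entero : Int) (seleccion : List Int) :
    cualesGo ordenado entero seleccion =
      PySem.List.sorted (seleccion ++ picks ordenado entero) (fun x => x) false := by
  induction ordenado, entero, seleccion using cualesGo.induct with
  | case1 ord e sel hpos hodd ih =>
      rw [cualesGo, if_pos hpos, if_pos hodd, ih]
      conv_rhs => rw [picks, if_pos hpos, if_pos hodd]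
      simp
  | case2 ord e sel hpos hodd ih =>
      rw [cualesGo, if_pos hpos, if_neg hodd, ih]
      conv_rhs => rw [picks, if_pos hpos, if_neg hodd]
      simp
  | case3 ord e sel hpos =>
      rw [cualesGo, if_neg hpos, picks, if_neg hpos]
      simp

theorem pyBitLengthAux_congr : ∀ (f1 f2 n : Nat), n ≤ f1 → n ≤ f2 →
    pyBitLengthAux f1 n = pyBitLengthAux f2 n := by
  intro f1
  induction f1 with
  | zero =>
      intro f2 n h1 _
      have : n = 0 := by omega
      subst this
      cases f2 <;> simp [pyBitLengthAux]
  | succ f ihf =>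
      intro f2 n h1 h2
      by_cases hn : n = 0
      · subst hn; cases f2 <;> simp [pyBitLengthAux]
      · obtain ⟨f2', rfl⟩ : ∃ k, f2 = k + 1 := ⟨f2 - 1, by omega⟩
        simp only [pyBitLengthAux, if_neg hn]
        rw [ihf f2' (n / 2) (by omega) (by omega)]

theorem pyBitLength_eq (n : Nat) :
    pyBitLength n = if n = 0 then 0 else pyBitLength (n / 2) + 1 := by
  unfold pyBitLength
  cases n with
  | zero => simp [pyBitLengthAux]
  | succ m =>
      simp only [pyBitLengthAux, if_neg (Nat.succ_ne_zero m)]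
      congr 1
      exact pyBitLengthAux_congr m ((m + 1) / 2) ((m + 1) / 2) (by omega) (by omega)

theorem pyBitLength_step (e : Int) (h : 0 < e) :
    pyBitLength e.toNat = pyBitLength (PySem.Int.floordiv e 2).toNat + 1 := by
  rw [floordiv_two_toNat]
  rw [pyBitLength_eq, if_neg (by omega)]

theorem shift_step (e : Int) (i : Nat) :
    PySem.Int.floordiv (PySem.Int.floordiv e 2) (2 ^ i) =
      PySem.Int.floordiv e (2 ^ (i + 1)) := by
  simp only [PySem.Int.floordiv]
  rw [Int.fdiv_fdiv_eq_fdiv_mul _ (by norm_num) (by positivity), ← pow_succ']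

-- A's selection equals B's table-then-filter list, inside Pre_.
theorem picks_eq_bits :
    ∀ (N : Nat) (e : Int) (ord : List Int), e.toNat ≤ N →
      (0 < e → pyBitLength e.toNat ≤ ord.length) →
      picks ord e =
        ((List.range (pyBitLength e.toNat)).filter
            (fun i => PySem.Int.mod (PySem.Int.floordiv e (2 ^ i)) 2 = 1)).map
          (fun i => ((ord.drop (ord.length - pyBitLength e.toNat)).reverse).getD i 0) := by
  intro N
  induction N with
  | zero =>
      intro e ord hN _
      have he : ¬ 0 < e := by omega
      rw [picks, if_neg he]
      have : e.toNat = 0 := by omega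
      simp [this, pyBitLength, pyBitLengthAux]
  | succ N ih =>
      intro e ord hN hlen
      by_cases hpos : 0 < e
      · have hbit := pyBitLength_step e hpos
        set e' := PySem.Int.floordiv e 2 with he'
        have he'nat : e'.toNat = e.toNat / 2 := floordiv_two_toNat e
        have hlen1 : pyBitLength e.toNat ≤ ord.length := hlen hpos
        have hordne : ord ≠ [] := List.ne_nil_of_length_pos (by omega)
        have hdroplen : ord.dropLast.length = ord.length - 1 := by simp
        -- removed = last :: removed'
        have hsplit := List.drop_append_of_le_length
          (l₂ := [ord.getLast hordne]) (l₁ := ord.dropLast)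
          (i := ord.length - pyBitLength e.toNat) (by rw [hdroplen]; omega)
        rw [List.dropLast_append_getLast hordne] at hsplit
        have hidx : ord.length - pyBitLength e.toNat =
            ord.dropLast.length - pyBitLength e'.toNat := by rw [hdroplen]; omega
        have hidx2 : ord.length - (pyBitLength e'.toNat + 1) =
            ord.length - pyBitLength e.toNat := by omega
        have hcons : (List.drop (ord.length - (pyBitLength e'.toNat + 1)) ord).reverse =
            ord.getLast?.getD 0 ::
              (List.drop (ord.dropLast.length - pyBitLength e'.toNat) ord.dropLast).reverse := by
          rw [hidx2, hsplit, List.reverse_append, List.reverse_singleton,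
              List.singleton_append, hidx, List.getLast?_eq_getLast_of_ne_nil hordne,
              Option.getD_some]
        have hshift : ∀ i : Nat,
            PySem.Int.floordiv e' (2 ^ i) = PySem.Int.floordiv e (2 ^ (i + 1)) := by
          intro i; rw [he']; exact shift_step e i
        have hone : PySem.Int.floordiv e 1 = e := by
          simp [PySem.Int.floordiv, Int.fdiv_one]
        have hfun1 : ((fun i => decide (PySem.Int.mod (PySem.Int.floordiv e (2 ^ i)) 2 = 1))
              ∘ Nat.succ)
            = (fun i => decide (PySem.Int.mod (PySem.Int.floordiv e' (2 ^ i)) 2 = 1)) := by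
          funext i
          simp only [Function.comp_apply, Nat.succ_eq_add_one, ← hshift]
        have ihe := ih e' ord.dropLast (by omega) (by intro _; rw [hdroplen]; omega)
        rw [picks, if_pos hpos, ← he', ihe, hbit, List.range_succ_eq_map, List.filter_cons,
            pow_zero, hone]
        simp only [List.filter_map, hfun1]
        by_cases hodd : PySem.Int.mod e 2 = 1
        · rw [if_pos hodd, if_pos (decide_eq_true hodd), List.map_cons, List.map_map]
          simp only [hcons, List.getD_cons_zero, List.singleton_append]
          congr 1
        · rw [if_neg hodd, if_neg (by simpa using hodd), List.map_map]
          simp only [hcons, List.nil_append]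
          apply List.map_congr_left
          intro i _
          simp [Function.comp]
      · rw [picks, if_neg hpos]
        have : e.toNat = 0 := by omega
        simp [this, pyBitLength, pyBitLengthAux]

-- ===== VERDICT (by name: the statement is the Claim_ definition above) =====
theorem cuales_spec : Claim_equal_cuales := by
  intro ordenado entero _ hpre
  unfold Spec_cuales cuales cuales_alt
  rw [cualesGo_eq_sorted_picks, List.nil_append]
  by_cases hpos : 0 < entero
  · rw [if_neg (by omega)]
    dsimp only
    have hn1 : 1 ≤ pyBitLength entero.toNat := by
      rw [pyBitLength_step entero hpos]; omega
    rw [picks_eq_bits entero.toNat entero ordenado le_rfl hpre]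
    rw [PySem.List.slice_from_neg_natCast _ _ hn1]
  · rw [if_pos (by omega), picks, if_neg hpos]
    simp [PySem.List.sorted]
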